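-- pv_equiv track=rewrite | github.com/ekimb/viral-mutation | bin/uniprot.py | parse_uniprot
-- ===== SOURCE A (Python) =====
-- def parse_uniprot(entry):
--     fields = entry.split(' ')
--     species_raw = [x for x in fields if "OS=" in x][0]
--     species_idx = [i for i in range(len(fields)) if fields[i] == species_raw][0]
--     protein = " ".join(fields[1:species_idx])
--     species = species_raw.split("=")[1]
--     meta = {
--         'species': species,
--         'protein': protein
--     }
--     return meta
-- ===== SOURCE B (Python) =====
-- def parse_uniprot(entry):
--     # locate the first "OS=" in the raw string; the token containing it is the
--     # last word of the left half glued to the first word of the right half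
--     pos = entry.find("OS=")
--     if pos == -1:
--         raise IndexError("no field contains OS=")
--     pre = entry[:pos].split(' ')
--     post = entry[pos + 3:].split(' ')
--     species_raw = pre[-1] + "OS=" + post[0]
--     return {
--         'species': species_raw.split("=")[1],
--         'protein': " ".join(pre[1:-1]),
--     }
-- ===== Notes on version B (the rewrite author's own statement) =====
-- stated objective: alternative
-- what changed: A splits the whole entry into fields and scans that list twice (all fields containing 'OS=', then all indices whose field equals that value); B never scans the field list: it locates the first 'OS=' occurrence in the raw string with str.find, splits only the two halves around it, and reassembles the species token from the last word of the left half and the first word of the right half.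
import Mathlib
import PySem

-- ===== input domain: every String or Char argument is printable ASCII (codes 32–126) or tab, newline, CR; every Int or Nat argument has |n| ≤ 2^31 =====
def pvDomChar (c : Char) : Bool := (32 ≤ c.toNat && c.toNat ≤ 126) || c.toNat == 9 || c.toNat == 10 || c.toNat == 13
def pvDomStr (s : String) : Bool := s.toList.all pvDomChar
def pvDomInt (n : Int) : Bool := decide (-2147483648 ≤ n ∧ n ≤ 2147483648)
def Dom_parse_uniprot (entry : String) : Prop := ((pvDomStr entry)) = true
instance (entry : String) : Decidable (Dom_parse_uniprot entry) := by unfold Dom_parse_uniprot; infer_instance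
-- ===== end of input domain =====

-- B works on the raw string instead of scanning the token list: it locates the first "OS="
-- occurrence with str.find, splits only the two halves around it, and reassembles the
-- species token from the last word of the left half and the first word of the right half.

-- ===== PORT A =====
def parse_uniprot (entry : String) : List (String × String) :=
  let fields := (PySem.Str.split? entry " ").getD []
  match PySem.List.pyGet? (fields.filter (fun x => PySem.Str.isIn "OS=" x)) 0 with
  | none => []   -- Python: IndexError (excluded by Pre_)
  | some species_raw =>
    match PySem.List.pyGet?
        ((PySem.List.pyRange 0 (fields.length : Int) 1).filter
          (fun i => PySem.List.pyGet? fields i == some species_raw)) 0 with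
    | none => []   -- Python: IndexError (unreachable given the first match)
    | some species_idx =>
      let protein := PySem.Str.join " " (PySem.List.slice fields (some 1) (some species_idx))
      match PySem.List.pyGet? ((PySem.Str.split? species_raw "=").getD []) 1 with
      | none => []   -- Python: IndexError (unreachable: species_raw contains "OS=")
      | some species => [("species", species), ("protein", protein)]

-- ===== PORT B =====
def parse_uniprot_alt (entry : String) : List (String × String) :=
  let pos := PySem.Str.find entry "OS="
  if pos == -1 then []   -- Python: raise IndexError (excluded by Pre_)
  else
    let pre := (PySem.Str.split? (PySem.Str.slice entry none (some pos)) " ").getD []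
    let post := (PySem.Str.split? (PySem.Str.slice entry (some (pos + 3)) none) " ").getD []
    match PySem.List.pyGet? pre (-1), PySem.List.pyGet? post 0 with
    | some lastPre, some headPost =>
      let species_raw := lastPre ++ "OS=" ++ headPost
      match PySem.List.pyGet? ((PySem.Str.split? species_raw "=").getD []) 1 with
      | none => []   -- unreachable: species_raw contains "="
      | some species =>
          [("species", species),
           ("protein", PySem.Str.join " " (PySem.List.slice pre (some 1) (some (-1))))]
    | _, _ => []   -- unreachable: split(' ') never returns an empty list

-- ===== PRECONDITION & SPEC =====
-- A (and B) raise IndexError when no space-separated field contains "OS="; Pre_ excludes exactly those.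
def Pre_parse_uniprot (entry : String) : Prop :=
  ((PySem.Str.split? entry " ").getD []).any (fun x => PySem.Str.isIn "OS=" x) = true
instance (entry : String) : Decidable (Pre_parse_uniprot entry) := by
  unfold Pre_parse_uniprot; infer_instance
def pvWitness_parse_uniprot : String := "sp|P1|X Protein name OS=Homo sapiens OX=9606"

def Spec_parse_uniprot (entry : String) (out : List (String × String)) : Prop :=
  out = parse_uniprot_alt entry
instance (entry : String) (out : List (String × String)) : Decidable (Spec_parse_uniprot entry out) := by
  unfold Spec_parse_uniprot; infer_instance

-- ===== CLAIM (what is proved, stated in full; the proofs are below) =====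
def Claim_equal_parse_uniprot : Prop :=
  ∀ (entry : String), Dom_parse_uniprot entry → Pre_parse_uniprot entry →
    Spec_parse_uniprot entry (parse_uniprot entry)

-- ===== LEMMAS AND PROOFS =====

-- a structural view of Python's split on a single separator character
def pvSplit (c : Char) : List Char → List (List Char)
  | [] => [[]]
  | x :: rest => if x = c then [] :: pvSplit c rest else (pvSplit c rest).modifyHead (x :: ·)

theorem pvSplit_ne_nil (c : Char) (l : List Char) : pvSplit c l ≠ [] := by
  induction l with
  | nil => simp [pvSplit]
  | cons x rest ih =>
    simp only [pvSplit]
    split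
    · simp
    · cases hr : pvSplit c rest with
      | nil => exact absurd hr ih
      | cons h t => simp

theorem pvSplit_go (c : Char) (fuel : Nat) (l cur : List Char) (acc : List (List Char))
    (h : l.length < fuel) :
    PySem.Chars.splitOn.go [c] fuel l cur acc
      = acc.reverse ++ (pvSplit c l).modifyHead (cur.reverse ++ ·) := by
  induction fuel generalizing l cur acc with
  | zero => omega
  | succ f ih =>
    cases l with
    | nil => simp [PySem.Chars.splitOn.go, pvSplit]
    | cons x rest =>
      by_cases hx : x = c
      · subst hx
        rw [PySem.Chars.splitOn.go]
        simp only [List.isPrefixOf, beq_self_eq_true, Bool.true_and, if_true]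
        have hd : List.drop [x].length (x :: rest) = rest := by simp
        rw [hd, ih rest [] ((List.reverse cur) :: acc) (by simpa using Nat.lt_of_succ_lt_succ h)]
        simp [pvSplit]
        exact congrFun List.modifyHead_id (pvSplit x rest)
      · rw [PySem.Chars.splitOn.go]
        have hp : [c].isPrefixOf (x :: rest) = false := by
          simp [List.isPrefixOf]; exact fun hc => absurd hc.symm hx
        rw [hp]
        simp only [Bool.false_eq_true, if_false]
        rw [ih rest (x :: cur) acc (by simpa using Nat.lt_of_succ_lt_succ h)]
        simp only [pvSplit, if_neg hx]
        rw [List.modifyHead_modifyHead]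
        cases hr : pvSplit c rest with
        | nil => exact absurd hr (pvSplit_ne_nil c rest)
        | cons hh tt => simp

theorem pv_modifyHead_fun_id (l : List (List Char)) : l.modifyHead (fun x => x) = l :=
  congrFun List.modifyHead_id l

def pvLast (l : List (List Char)) : List Char := l.getLast?.getD []

theorem pvLast_cons_cons (a b : List Char) (t : List (List Char)) :
    pvLast (a :: b :: t) = pvLast (b :: t) := by simp [pvLast]

theorem splitOn_eq_pvSplit (c : Char) (l : List Char) :
    PySem.Chars.splitOn l [c] = pvSplit c l := by
  unfold PySem.Chars.splitOn
  rw [pvSplit_go c (l.length + 1) l [] [] (by omega)]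
  simp
  exact pv_modifyHead_fun_id (pvSplit c l)

theorem split?_getD (s : String) (c : Char) (sep : String) (hsep : sep.toList = [c]) :
    (PySem.Str.split? s sep).getD [] = (pvSplit c s.toList).map String.ofList := by
  simp [PySem.Str.split?, PySem.Chars.split?, hsep, splitOn_eq_pvSplit]

theorem pvSplit_nosep_append (c : Char) (m b : List Char) (hm : ∀ x ∈ m, x ≠ c) :
    pvSplit c (m ++ b) = (pvSplit c b).modifyHead (m ++ ·) := by
  induction m with
  | nil => simp
           exact (pv_modifyHead_fun_id (pvSplit c b)).symm
  | cons x m' ih =>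
    have hx : x ≠ c := hm x (List.mem_cons_self)
    simp only [List.cons_append, pvSplit, if_neg hx,
      ih (fun y hy => hm y (List.mem_cons_of_mem x hy)), List.modifyHead_modifyHead]
    rfl

theorem pvSplit_append (c : Char) (a b : List Char) :
    pvSplit c (a ++ b)
      = (pvSplit c a).dropLast ++ (pvSplit c b).modifyHead (pvLast (pvSplit c a) ++ ·) := by
  induction a with
  | nil => simp [pvSplit, pvLast]
           exact (pv_modifyHead_fun_id (pvSplit c b)).symm
  | cons x a' ih =>
    by_cases hx : x = c
    · subst hx
      cases hp : pvSplit x a' with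
      | nil => exact absurd hp (pvSplit_ne_nil x a')
      | cons h t =>
        simp only [List.cons_append, pvSplit, ih, hp]
        simp [pvLast_cons_cons]
    · cases hp : pvSplit c a' with
      | nil => exact absurd hp (pvSplit_ne_nil c a')
      | cons h t =>
        cases t with
        | nil =>
          simp only [List.cons_append, pvSplit, if_neg hx, ih, hp]
          simp [List.modifyHead_modifyHead, pvLast]
          rfl
        | cons t0 ts =>
          simp only [List.cons_append, pvSplit, if_neg hx, ih, hp]
          simp [pvLast_cons_cons]

theorem pvSplit_head_prefix (c : Char) (l : List Char) : (pvSplit c l).head! <+: l := by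
  induction l with
  | nil => simp [pvSplit]
  | cons x rest ih =>
    by_cases hx : x = c
    · simp [pvSplit, hx]
    · cases hp : pvSplit c rest with
      | nil => exact absurd hp (pvSplit_ne_nil c rest)
      | cons h t =>
        simp only [pvSplit, if_neg hx, hp, List.modifyHead_cons, List.head!_cons]
        rw [hp] at ih
        simp only [List.head!_cons] at ih
        exact List.cons_prefix_cons.mpr ⟨rfl, ih⟩

theorem pvSplit_mem_infix (c : Char) (l : List Char) : ∀ x ∈ pvSplit c l, x <:+: l := by
  induction l with
  | nil => intro x hx; simp [pvSplit] at hx; simp [hx]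
  | cons y rest ih =>
    intro x hx
    by_cases hy : y = c
    · simp only [pvSplit, if_pos hy, List.mem_cons] at hx
      rcases hx with rfl | hx
      · exact List.nil_infix
      · exact (ih x hx).trans (List.infix_cons (List.infix_refl rest))
    · cases hp : pvSplit c rest with
      | nil => exact absurd hp (pvSplit_ne_nil c rest)
      | cons h t =>
        simp only [pvSplit, if_neg hy, hp, List.modifyHead_cons, List.mem_cons] at hx
        rcases hx with rfl | hx
        · have hh : h <+: rest := by
            have := pvSplit_head_prefix c rest
            rw [hp] at this; simpa using this
          exact ((List.cons_prefix_cons.mpr ⟨rfl, hh⟩ : y :: h <+: y :: rest)).isInfix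
        · have : x ∈ pvSplit c rest := by rw [hp]; exact List.mem_cons_of_mem h hx
          exact (ih x this).trans (List.infix_cons (List.infix_refl rest))

theorem pvSplit_length_ge_two (c : Char) (l : List Char) (h : c ∈ l) :
    2 ≤ (pvSplit c l).length := by
  induction l with
  | nil => simp at h
  | cons x rest ih =>
    by_cases hx : x = c
    · have : 1 ≤ (pvSplit c rest).length :=
        List.length_pos_iff.mpr (pvSplit_ne_nil c rest)
      simp only [pvSplit, if_pos hx, List.length_cons]
      omega
    · have hm : c ∈ rest := by
        rcases List.mem_cons.mp h with rfl | hm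
        · exact absurd rfl hx
        · exact hm
      have := ih hm
      simp only [pvSplit, if_neg hx, List.length_modifyHead]
      omega

-- filter-then-head is find?
theorem pv_head?_filter {α : Type} (p : α → Bool) (l : List α) :
    (l.filter p).head? = l.find? p := by
  induction l with
  | nil => rfl
  | cons x xs ih => by_cases h : p x = true <;> simp [List.filter, List.find?, h, ih]

-- first element of a filtered range is the unique minimal index satisfying q
theorem pv_range_filter_head {n j : Nat} {q : Nat → Bool}
    (hj : j < n) (hq : q j = true) (hmin : ∀ k, k < j → q k = false) :
    ((List.range n).filter q).head? = some j := by
  rw [pv_head?_filter]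
  induction n generalizing q j with
  | zero => omega
  | succ m ih =>
    rw [List.range_succ_eq_map, List.find?]
    cases j with
    | zero => simp [hq]
    | succ k =>
      have h0 : q 0 = false := hmin 0 (Nat.succ_pos k)
      rw [h0]
      simp only [List.find?_map]
      have hc : (q ∘ Nat.succ) = fun i => q (i + 1) := rfl
      have := ih (q := fun i => q (i + 1)) (j := k) (by omega) hq
        (fun t ht => hmin (t + 1) (by omega))
      rw [hc, this]; rfl

theorem pv_os_no_space : ∀ x ∈ ['O', 'S', '='], x ≠ ' ' := by
  intro x hx
  rcases List.mem_cons.mp hx with rfl | hx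
  · decide
  rcases List.mem_cons.mp hx with rfl | hx
  · decide
  rcases List.mem_cons.mp hx with rfl | hx
  · decide
  · simp at hx

-- (x::xs)[1:-1] is xs.dropLast
theorem pv_slice_one_negone {α : Type} (x : α) (xs : List α) :
    PySem.List.slice (x :: xs) (some 1) (some (-1)) = xs.dropLast := by
  simp [PySem.List.slice, PySem.List.clampIdx, List.dropLast_eq_take]
  split_ifs <;> omega

-- the slice fields[1:idx] when idx = |L1| in L1 ++ v :: L2
theorem pv_take_drop_mid {α : Type} (L1 L2 : List α) (v : α) :
    (((L1 ++ v :: L2).drop 1).take (L1.length - 1)) = L1.drop 1 := by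
  cases L1 with
  | nil => simp
  | cons a t => simp [List.take_left' rfl]

theorem parse_uniprot_eq_alt (entry : String) (hpre : Pre_parse_uniprot entry) :
    parse_uniprot entry = parse_uniprot_alt entry := by
  unfold Pre_parse_uniprot at hpre
  have hsp : (" " : String).toList = [' '] := rfl
  set cs := entry.toList with hcs
  rw [split?_getD entry ' ' " " hsp] at hpre
  -- the whole string contains "OS="
  have hinfix : ['O', 'S', '='] <:+: cs := by
    rw [List.any_eq_true] at hpre
    obtain ⟨x, hx, hpx⟩ := hpre
    rw [List.mem_map] at hx
    obtain ⟨y, hy, rfl⟩ := hx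
    have h1 := (PySem.Str.isIn_iff_infix "OS=" (String.ofList y)).mp hpx
    have h2 : ['O', 'S', '='] <:+: y := by simpa using h1
    exact h2.trans (pvSplit_mem_infix ' ' cs y hy)
  have hfind : 0 ≤ PySem.Chars.find cs ['O', 'S', '='] :=
    (PySem.Chars.find_nonneg_iff cs ['O', 'S', '=']).mpr hinfix
  set pos := PySem.Chars.find cs ['O', 'S', '='] with hposdef
  set p := pos.toNat with hp
  have hposp : pos = (p : Int) := (Int.toNat_of_nonneg hfind).symm
  obtain ⟨hpref, hmin⟩ := PySem.Chars.find_spec (s := cs) (sub := ['O', 'S', '=']) hfind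
  rw [← hposdef, ← hp] at hpref hmin
  -- decompose the string around the first occurrence
  obtain ⟨r, hr⟩ := hpref
  have hrr : r = cs.drop (p + 3) := by
    have h3 : (cs.drop p).drop 3 = r := by rw [← hr]; simp
    rw [← h3, List.drop_drop]
  have hdecomp : cs = cs.take p ++ (['O', 'S', '='] ++ cs.drop (p + 3)) := by
    rw [hrr] at hr
    conv_lhs => rw [← List.take_append_drop p cs, ← hr]
  set la := pvSplit ' ' (cs.take p) with hla
  set pb := pvSplit ' ' (cs.drop (p + 3)) with hpb
  obtain ⟨hb, tb, hpbeq⟩ := List.exists_cons_of_ne_nil (pvSplit_ne_nil ' ' (cs.drop (p + 3)))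
  have hpbeq' : pb = hb :: tb := hpbeq
  -- the pieces of the whole string
  have hfieldsEq : pvSplit ' ' cs
      = la.dropLast ++ (pvLast la ++ (['O', 'S', '='] ++ hb)) :: tb := by
    conv_lhs => rw [hdecomp]
    rw [pvSplit_append, pvSplit_nosep_append ' ' _ _ pv_os_no_space, hpbeq, ← hla]
    simp
  -- no "OS=" before the found occurrence
  have hnotake : ¬ ['O', 'S', '='] <:+: cs.take p := by
    intro hinf
    obtain ⟨j, hj⟩ := (PySem.Chars.exists_prefix_drop_iff_isIn _ _).mpr
      ((PySem.Chars.isIn_iff_infix _ _).mpr hinf)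
    rw [List.drop_take] at hj
    obtain ⟨hj1, hj2⟩ := List.prefix_take_iff.mp hj
    simp only [List.length_cons, List.length_nil] at hj2
    exact hmin j (by omega) hj1
  have hclean : ∀ y ∈ la, ¬ ['O', 'S', '='] <:+: y := fun y hy hinf =>
    hnotake (hinf.trans (pvSplit_mem_infix ' ' _ y hy))
  -- the species token and its index
  set v := String.ofList (pvLast la ++ (['O', 'S', '='] ++ hb)) with hv
  set idx := la.dropLast.length with hidx
  set L1 := la.dropLast.map String.ofList with hL1
  set L2 := tb.map String.ofList with hL2
  have hmapEq : (PySem.Str.split? entry " ").getD [] = L1 ++ v :: L2 := by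
    rw [split?_getD entry ' ' " " hsp, ← hcs, hfieldsEq]
    simp [hv, hL1, hL2]
  have hpv : PySem.Str.isIn "OS=" v = true := by
    rw [PySem.Str.isIn_iff_infix, hv]
    simp only [String.toList_ofList]
    exact ⟨pvLast la, hb, by simp⟩
  have hfalse : ∀ x ∈ L1, PySem.Str.isIn "OS=" x = false := by
    intro x hx
    rw [hL1, List.mem_map] at hx
    obtain ⟨y, hy, rfl⟩ := hx
    rw [Bool.eq_false_iff]
    intro ht
    have h1 := (PySem.Str.isIn_iff_infix "OS=" (String.ofList y)).mp ht
    have h2 : ['O', 'S', '='] <:+: y := by simpa using h1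
    exact hclean y (List.mem_of_mem_dropLast hy) h2
  have hne : ∀ x ∈ L1, x ≠ v := by
    intro x hx hxv
    rw [hxv] at hx
    rw [hfalse v hx] at hpv
    exact Bool.noConfusion hpv
  have hlen1 : L1.length = idx := by rw [hL1, List.length_map, hidx]
  -- A's first comprehension yields v
  have hA1 : PySem.List.pyGet?
      ((L1 ++ v :: L2).filter (fun x => PySem.Str.isIn "OS=" x)) 0 = some v := by
    rw [PySem.List.pyGet?_zero, ← List.head?_eq_getElem?, pv_head?_filter, List.find?_append]
    have hn : L1.find? (fun x => PySem.Str.isIn "OS=" x) = none :=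
      List.find?_eq_none.mpr (fun x hx => by simpa using hfalse x hx)
    rw [hn, Option.none_or, List.find?_cons_of_pos hpv]
  -- A's second comprehension yields idx
  have hA2 : PySem.List.pyGet?
      ((PySem.List.pyRange 0 ((L1 ++ v :: L2).length : Int) 1).filter
        (fun i => PySem.List.pyGet? (L1 ++ v :: L2) i == some v)) 0 = some (idx : Int) := by
    rw [PySem.List.pyRange_zero_natCast, List.filter_map, PySem.List.pyGet?_zero,
      ← List.head?_eq_getElem?, List.head?_map]
    have hh : ((List.range (L1 ++ v :: L2).length).filter
        ((fun i => PySem.List.pyGet? (L1 ++ v :: L2) i == some v) ∘ (fun k : Nat => (k : Int)))).head?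
        = some idx := by
      apply pv_range_filter_head
      · simp only [List.length_append, List.length_cons]; omega
      · show (PySem.List.pyGet? (L1 ++ v :: L2) ((idx : Nat) : Int) == some v) = true
        rw [PySem.List.pyGet?_natCast, ← hlen1, List.getElem?_append_right (le_refl _)]
        simp
      · intro k hk
        show (PySem.List.pyGet? (L1 ++ v :: L2) ((k : Nat) : Int) == some v) = false
        rw [PySem.List.pyGet?_natCast, List.getElem?_append_left (by omega)]
        have hkl : k < L1.length := by omega
        rw [List.getElem?_eq_getElem hkl]
        simpa using hne L1[k] (List.getElem_mem hkl)
    rw [hh]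
    rfl
  -- B's branch data
  have hfb : PySem.Str.find entry "OS=" = pos := by
    rw [hposdef]
    simp [PySem.Str.find_eq]
    rw [← hcs]
  have hslpre : (PySem.Str.slice entry none (some (PySem.Str.find entry "OS="))).toList
      = cs.take p := by
    rw [PySem.Str.toList_slice, PySem.Chars.slice_eq_listSlice, hfb,
      PySem.List.slice_to entry.toList hfind, ← hp, ← hcs]
  have hpreList : (PySem.Str.split? (PySem.Str.slice entry none (some (PySem.Str.find entry "OS="))) " ").getD []
      = la.map String.ofList := by
    rw [split?_getD _ ' ' " " hsp, hslpre, hla]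
  have htn : (pos + 3).toNat = p + 3 := by rw [hposp]; omega
  have hslpost : (PySem.Str.slice entry (some (PySem.Str.find entry "OS=" + 3)) none).toList
      = cs.drop (p + 3) := by
    rw [PySem.Str.toList_slice, PySem.Chars.slice_eq_listSlice, hfb,
      PySem.List.slice_from entry.toList (by omega), htn, ← hcs]
  have hpostList : (PySem.Str.split? (PySem.Str.slice entry (some (PySem.Str.find entry "OS=" + 3)) none) " ").getD []
      = pb.map String.ofList := by
    rw [split?_getD _ ' ' " " hsp, hslpost, hpb]
  have hgetPre : PySem.List.pyGet? (la.map String.ofList) (-1)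
      = some (String.ofList (pvLast la)) := by
    rw [PySem.List.pyGet?_neg_one, List.getLast?_eq_getElem?, pvLast,
      List.getLast?_eq_getElem?, List.length_map]
    have hlt : la.length - 1 < la.length :=
      Nat.sub_lt (List.length_pos_iff.mpr (pvSplit_ne_nil ' ' (cs.take p))) one_pos
    rw [List.getElem?_eq_getElem hlt, List.getElem?_map, List.getElem?_eq_getElem hlt]
    rfl
  have hgetPost : PySem.List.pyGet? (pb.map String.ofList) 0 = some (String.ofList hb) := by
    rw [hpbeq', PySem.List.pyGet?_zero]
    rfl
  have hvB : String.ofList (pvLast la) ++ "OS=" ++ String.ofList hb = v := by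
    apply String.toList_inj.mp
    simp [hv]
  -- "=" occurs in v, so v.split("=")[1] exists
  have hsplEq : (PySem.Str.split? v "=").getD [] = (pvSplit '=' v.toList).map String.ofList :=
    split?_getD v '=' "=" rfl
  have hmemEq : '=' ∈ v.toList := by
    simp [hv]
  have hlen2 : 1 < ((pvSplit '=' v.toList).map String.ofList).length := by
    rw [List.length_map]
    have := pvSplit_length_ge_two '=' v.toList hmemEq
    omega
  obtain ⟨w, hw⟩ : ∃ w, PySem.List.pyGet? ((PySem.Str.split? v "=").getD []) 1 = some w := by
    rw [hsplEq, show (1 : Int) = ((1 : Nat) : Int) from rfl, PySem.List.pyGet?_natCast,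
      List.getElem?_eq_getElem hlen2]
    exact ⟨_, rfl⟩
  -- the protein strings agree
  have hprot : PySem.List.slice (L1 ++ v :: L2) (some 1) (some (idx : Int))
      = PySem.List.slice (la.map String.ofList) (some 1) (some (-1)) := by
    obtain ⟨a0, la', hlaeq0⟩ := List.exists_cons_of_ne_nil (pvSplit_ne_nil ' ' (cs.take p))
    have hlaeq : la = a0 :: la' := hlaeq0
    have h2 : PySem.List.slice (L1 ++ v :: L2) (some 1) (some (idx : Int)) = L1.drop 1 := by
      rw [PySem.List.slice_toNat _ (by omega) (by omega)]
      simp only [Int.toNat_natCast, Int.toNat_one]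
      rw [← hlen1, pv_take_drop_mid]
    have h3 : PySem.List.slice (la.map String.ofList) (some 1) (some (-1))
        = (la'.map String.ofList).dropLast := by
      rw [hlaeq, List.map_cons, pv_slice_one_negone]
    rw [h2, h3, hL1, hlaeq]
    simp [List.tail_dropLast]
  -- assemble
  unfold parse_uniprot parse_uniprot_alt
  simp only []
  rw [hmapEq, hA1]
  dsimp only
  rw [hA2]
  dsimp only
  rw [show (PySem.Str.find entry "OS=" == -1) = false by
    rw [hfb, hposp]; simp]
  simp only [Bool.false_eq_true, if_false]
  rw [hpreList, hpostList, hgetPre, hgetPost]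
  dsimp only
  rw [hvB, hw, hprot]

-- ===== VERDICT (by name: the statement is the Claim_ definition above) =====
theorem parse_uniprot_spec : Claim_equal_parse_uniprot := by
  intro entry _ hpre
  unfold Spec_parse_uniprot
  exact parse_uniprot_eq_alt entry hpre
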